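-- pv_equiv track=rewrite | github.com/A-J-F-Mackintosh/syngraph | source/syngraph.py | compact_synteny_2
-- ===== SOURCE A (Python) =====
-- import collections
--
-- def compact_synteny_2(taxon_A, taxon_B):
--     chrom2chrom2LMS = collections.defaultdict(lambda : collections.defaultdict(set))
--     for B_chrom in taxon_B:
--         for LMS in taxon_B[B_chrom]:
--             for A_chrom in taxon_A:
--                 if LMS in taxon_A[A_chrom]:
--                     chrom2chrom2LMS[B_chrom][A_chrom].add(LMS)
--     return chrom2chrom2LMS
-- ===== SOURCE B (Python) =====
-- import collections
--
-- def compact_synteny_2(taxon_A, taxon_B):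
--     # Build once: marker -> list of A-chromosomes containing it (in taxon_A order),
--     # so the per-marker scan over all of taxon_A disappears.
--     idx = collections.defaultdict(list)
--     for A_chrom, markers in taxon_A.items():
--         for LMS in markers:
--             idx[LMS].append(A_chrom)
--     chrom2chrom2LMS = collections.defaultdict(lambda: collections.defaultdict(set))
--     for B_chrom, markers in taxon_B.items():
--         for LMS in markers:
--             for A_chrom in idx.get(LMS, ()):
--                 chrom2chrom2LMS[B_chrom][A_chrom].add(LMS)
--     return chrom2chrom2LMS
-- ===== Notes on version B (the rewrite author's own statement) =====
-- stated objective: faster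
-- what changed: B builds a marker-to-chromosomes index over taxon_A once and then, per B-marker, looks the matching A-chromosomes up directly, instead of A's inner membership scan over every taxon_A chromosome for every marker of every B chromosome; intended as faster — measured 2.68x at the largest size both finished (timing at n=4096 unconfirmed: both time out on some inputs there).
import Mathlib
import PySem

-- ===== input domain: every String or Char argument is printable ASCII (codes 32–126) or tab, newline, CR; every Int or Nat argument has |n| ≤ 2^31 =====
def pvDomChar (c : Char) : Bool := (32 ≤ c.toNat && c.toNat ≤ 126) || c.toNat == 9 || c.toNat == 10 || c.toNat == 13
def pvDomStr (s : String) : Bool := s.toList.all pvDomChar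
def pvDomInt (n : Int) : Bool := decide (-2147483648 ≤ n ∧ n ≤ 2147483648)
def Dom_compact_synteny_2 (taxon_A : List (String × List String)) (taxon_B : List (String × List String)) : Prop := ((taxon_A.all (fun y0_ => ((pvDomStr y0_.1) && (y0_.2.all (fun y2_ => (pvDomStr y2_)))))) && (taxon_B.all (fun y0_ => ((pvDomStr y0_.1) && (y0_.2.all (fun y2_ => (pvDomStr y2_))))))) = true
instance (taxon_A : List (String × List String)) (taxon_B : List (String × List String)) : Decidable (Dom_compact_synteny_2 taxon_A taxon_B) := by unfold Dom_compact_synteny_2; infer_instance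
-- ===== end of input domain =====

-- B replaces A's per-marker scan over all of taxon_A by a marker→chromosomes index built once (alternative data structure).

-- ===== PORT A =====
-- the defaultdict statement chrom2chrom2LMS[B_chrom][A_chrom].add(LMS) (shared verbatim by A and B)
def pvAdd (d : PySem.Dict String (PySem.Dict String (PySem.Set String))) (b a x : String) :
    PySem.Dict String (PySem.Dict String (PySem.Set String)) :=
  d.modify b PySem.Dict.empty (fun inner => inner.modify a PySem.Set.empty (fun s => s.add x))

def compact_synteny_2 (taxon_A : List (String × List String)) (taxon_B : List (String × List String)) : List (String × List (String × List String)) :=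
  (taxon_B.foldl
    (fun d B =>
      B.2.foldl
        (fun d lms =>
          taxon_A.foldl
            (fun d A => if A.2.contains lms then pvAdd d B.1 A.1 lms else d) d)
        d)
    PySem.Dict.empty).items.map (fun p => (p.1, p.2.items))

-- ===== PORT B =====
-- idx = defaultdict(list); for A_chrom, markers in taxon_A.items(): for LMS in markers: idx[LMS].append(A_chrom)
def pvBuildIdx (taxon_A : List (String × List String)) : PySem.Dict String (List String) :=
  taxon_A.foldl (fun d A => A.2.foldl (fun d lms => d.modify lms [] (· ++ [A.1])) d) PySem.Dict.empty

def compact_synteny_2_alt (taxon_A : List (String × List String)) (taxon_B : List (String × List String)) : List (String × List (String × List String)) :=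
  let idx := pvBuildIdx taxon_A
  (taxon_B.foldl
    (fun d B =>
      B.2.foldl
        (fun d lms => (idx.getD lms []).foldl (fun d A_chrom => pvAdd d B.1 A_chrom lms) d)
        d)
    PySem.Dict.empty).items.map (fun p => (p.1, p.2.items))

-- ===== PRECONDITION & SPEC =====
def Spec_compact_synteny_2 (taxon_A : List (String × List String)) (taxon_B : List (String × List String)) (out : List (String × List (String × List String))) : Prop := out = compact_synteny_2_alt taxon_A taxon_B
instance (taxon_A : List (String × List String)) (taxon_B : List (String × List String)) (out : List (String × List (String × List String))) : Decidable (Spec_compact_synteny_2 taxon_A taxon_B out) := by unfold Spec_compact_synteny_2; infer_instance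

-- ===== CLAIM (what is proved, stated in full; the proofs are below) =====
def Claim_equal_compact_synteny_2 : Prop := ∀ (taxon_A : List (String × List String)) (taxon_B : List (String × List String)), Dom_compact_synteny_2 taxon_A taxon_B → Spec_compact_synteny_2 taxon_A taxon_B (compact_synteny_2 taxon_A taxon_B)

-- ===== LEMMAS AND PROOFS =====

-- the value list the index holds at key lms after one inner loop over xs (appending v per occurrence)
theorem pvIdx_inner (xs : List String) (v lms : String) (d : PySem.Dict String (List String)) :
    (xs.foldl (fun d x => d.modify x [] (· ++ [v])) d).getD lms []
      = d.getD lms [] ++ List.replicate (xs.count lms) v := by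
  induction xs generalizing d with
  | nil => simp
  | cons x xs ih =>
      simp only [List.foldl_cons, ih, PySem.Dict.getD_modify, List.count_cons]
      by_cases h : lms = x
      · subst h
        simp [List.append_assoc, List.replicate_succ]
      · simp [h, Ne.symm h]

-- idx[lms] is every matching A-chromosome name, once per occurrence, in taxon_A order
theorem pvIdx_getD (taxon_A : List (String × List String)) (lms : String) :
    (pvBuildIdx taxon_A).getD lms []
      = taxon_A.flatMap (fun A => List.replicate (A.2.count lms) A.1) := by
  unfold pvBuildIdx
  suffices h : ∀ (d : PySem.Dict String (List String)),
      (taxon_A.foldl (fun d A => A.2.foldl (fun d lms => d.modify lms [] (· ++ [A.1])) d) d).getD lms []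
        = d.getD lms [] ++ taxon_A.flatMap (fun A => List.replicate (A.2.count lms) A.1) by
    simpa using h PySem.Dict.empty
  induction taxon_A with
  | nil => simp
  | cons A tA ih =>
      intro d
      simp only [List.foldl_cons, ih, pvIdx_inner, List.flatMap_cons, List.append_assoc]

theorem pvAdd_idem (d : PySem.Dict String (PySem.Dict String (PySem.Set String))) (b a x : String) :
    pvAdd (pvAdd d b a x) b a x = pvAdd d b a x := by
  simp [pvAdd, PySem.Dict.modify, PySem.Dict.getD_insert_self, PySem.Dict.insert_insert_self,
    PySem.Set.add]
  split_ifs with h1 h2 h2 <;> simp_all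

theorem pvAdd_replicate (n : ℕ) (hn : 0 < n) (b a x : String)
    (d : PySem.Dict String (PySem.Dict String (PySem.Set String))) :
    (List.replicate n a).foldl (fun d A_chrom => pvAdd d b A_chrom x) d = pvAdd d b a x := by
  induction n generalizing d with
  | zero => omega
  | succ n ih =>
      rcases Nat.eq_zero_or_pos n with h | h
      · subst h; simp
      · simp only [List.replicate_succ, List.foldl_cons, ih h, pvAdd_idem]

-- the key step: A's scan over taxon_A for a fixed marker equals B's fold over idx[lms]
theorem pvStep_eq (taxon_A : List (String × List String)) (b lms : String)
    (d : PySem.Dict String (PySem.Dict String (PySem.Set String))) :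
    taxon_A.foldl (fun d A => if A.2.contains lms then pvAdd d b A.1 lms else d) d
      = ((pvBuildIdx taxon_A).getD lms []).foldl (fun d A_chrom => pvAdd d b A_chrom lms) d := by
  rw [pvIdx_getD]
  induction taxon_A generalizing d with
  | nil => rfl
  | cons A tA ih =>
      simp only [List.foldl_cons, List.flatMap_cons, List.foldl_append]
      rw [← ih]
      congr 1
      by_cases h : A.2.contains lms
      · have hc : 0 < A.2.count lms := by
          simpa [List.count_pos_iff] using (List.contains_iff_mem.mp h)
        rw [if_pos h, pvAdd_replicate _ hc]
      · have hc : A.2.count lms = 0 := by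
          simp only [List.count_eq_zero]
          simpa [List.contains_iff_mem] using h
        rw [if_neg h, hc]
        simp

-- ===== VERDICT (by name: the statement is the Claim_ definition above) =====
theorem compact_synteny_2_spec : Claim_equal_compact_synteny_2 := by
  intro taxon_A taxon_B _
  unfold Spec_compact_synteny_2 compact_synteny_2 compact_synteny_2_alt
  have hstep : (fun (d : PySem.Dict String (PySem.Dict String (PySem.Set String))) (B : String × List String) =>
        B.2.foldl (fun d lms =>
          taxon_A.foldl (fun d A => if A.2.contains lms then pvAdd d B.1 A.1 lms else d) d) d)
      = (fun d B =>
        B.2.foldl (fun d lms =>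
          ((pvBuildIdx taxon_A).getD lms []).foldl (fun d A_chrom => pvAdd d B.1 A_chrom lms) d) d) := by
    funext d B
    congr 1
    funext d lms
    exact pvStep_eq taxon_A B.1 lms d
  exact congrArg (fun x => (PySem.Dict.items x).map (fun p => (p.1, p.2.items)))
    (congrArg (fun f => List.foldl f PySem.Dict.empty taxon_B) hstep)
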